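-- pv_equiv track=rewrite | github.com/saeyoon17/Code-Structure-Aware-Transformer | py/process_utils.py | split_identifier_into_parts
-- ===== SOURCE A (Python) =====
-- from typing import List
--
-- def split_identifier_into_parts(identifier: str) -> List[str]:
--     """
--     Split a single identifier into parts on snake_case and camelCase
--     come from code transformer
--     """
--     snake_case = identifier.split("_")
--
--     identifier_parts = []  # type: List[str]
--     for i in range(len(snake_case)):
--         part = snake_case[i]
--         if len(part) > 0:
--             identifier_parts.extend(s.lower() for s in split_camelcase(part))
--     if len(identifier_parts) == 0:
--         return [identifier]
--     return identifier_parts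
--
-- def split_camelcase(camel_case_identifier: str) -> List[str]:
--     """
--     Split camelCase identifiers.
--     come from code transformer
--     """
--     if not len(camel_case_identifier):
--         return []
--     # split into words based on adjacent cases being the same
--     result = []
--     current = str(camel_case_identifier[0])
--     prev_upper = camel_case_identifier[0].isupper()
--     prev_digit = camel_case_identifier[0].isdigit()
--     prev_special = not camel_case_identifier[0].isalnum()
--     for c in camel_case_identifier[1:]:
--         upper = c.isupper()
--         digit = c.isdigit()
--         special = not c.isalnum()
--         new_upper_word = upper and not prev_upper
--         new_digit_word = digit and not prev_digit
--         new_special_word = special and not prev_special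
--         if new_digit_word or new_upper_word or new_special_word:
--             result.append(current)
--             current = c
--         elif not upper and prev_upper and len(current) > 1:
--             result.append(current[:-1])
--             current = current[-1] + c
--         elif not digit and prev_digit:
--             result.append(current)
--             current = c
--         elif not special and prev_special:
--             result.append(current)
--             current = c
--         else:
--             current += c
--         prev_digit = digit
--         prev_upper = upper
--         prev_special = special
--     result.append(current)
--     return result
-- ===== SOURCE B (Python) =====
-- from typing import List
--
-- def split_identifier_into_parts(identifier: str) -> List[str]:
--     """Two-pass camel splitter: tag each char's category, derive word lengths
--     from adjacent-tag transitions, then slice the part by those lengths."""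
--     parts = []  # type: List[str]
--     for part in identifier.split("_"):
--         if part:
--             parts.extend(w.lower() for w in _camel_words(part))
--     return parts or [identifier]
--
-- def _cat(c: str) -> int:
--     if c.isupper():
--         return 0
--     if c.isdigit():
--         return 1
--     if not c.isalnum():
--         return 2
--     return 3
--
-- def _camel_words(s: str) -> List[str]:
--     tags = [_cat(c) for c in s]
--     lens = []  # type: List[int]
--     cur = 1
--     for p, q in zip(tags, tags[1:]):
--         if p == q:
--             cur += 1
--         elif p == 0 and q == 3:
--             # upperCASE followed by lower: the boundary sits BEFORE the last
--             # upper char, but only when the running word is longer than 1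
--             if cur > 1:
--                 lens.append(cur - 1)
--                 cur = 2
--             else:
--                 cur += 1
--         else:
--             lens.append(cur)
--             cur = 1
--     lens.append(cur)
--     words = []
--     rest = s
--     for n in lens:
--         words.append(rest[:n])
--         rest = rest[n:]
--     return words
-- ===== Notes on version B (the rewrite author's own statement) =====
-- stated objective: alternative
-- what changed: The camelCase splitter's single flag-tracking loop (result/current-word/prev-upper/prev-digit/prev-special state with a five-way branch) is replaced by a two-pass scheme: tag every character with its category (upper/digit/special/other), derive the word lengths from adjacent-tag transitions, then slice the part by those lengths; the snake split and empty fallback are kept.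
import Mathlib
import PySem

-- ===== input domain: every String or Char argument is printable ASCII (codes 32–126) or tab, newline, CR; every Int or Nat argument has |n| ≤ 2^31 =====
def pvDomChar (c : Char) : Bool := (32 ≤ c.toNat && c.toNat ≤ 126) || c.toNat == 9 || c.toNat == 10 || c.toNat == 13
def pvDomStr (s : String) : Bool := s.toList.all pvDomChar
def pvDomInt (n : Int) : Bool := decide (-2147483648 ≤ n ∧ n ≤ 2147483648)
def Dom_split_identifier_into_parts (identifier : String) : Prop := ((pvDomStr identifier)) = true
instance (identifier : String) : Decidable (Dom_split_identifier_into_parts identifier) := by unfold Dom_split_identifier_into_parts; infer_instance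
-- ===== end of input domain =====

-- B replaces A's flag-tracking camel loop by a two-pass scheme (category tags, then word
-- lengths from adjacent-tag transitions, then slicing); objective: alternative decomposition.


-- ===== PORT A =====
-- A's inner loop of split_camelcase: state (result, current, prev_upper, prev_digit, prev_special)
def pvCamelLoopA (res : List (List Char)) (cur : List Char) (pU pD pS : Bool) :
    List Char → List (List Char)
  | [] => res ++ [cur]
  | c :: rest =>
    let upper := PySem.Chars.isupper c
    let digit := PySem.Chars.isdigit c
    let special := !PySem.Chars.isalnum c
    if (digit && !pD) || (upper && !pU) || (special && !pS) then
      pvCamelLoopA (res ++ [cur]) [c] upper digit special rest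
    else if !upper && pU && decide (cur.length > 1) then
      pvCamelLoopA (res ++ [cur.dropLast]) [cur.getLast?.getD ' ', c] upper digit special rest
    else if !digit && pD then
      pvCamelLoopA (res ++ [cur]) [c] upper digit special rest
    else if !special && pS then
      pvCamelLoopA (res ++ [cur]) [c] upper digit special rest
    else
      pvCamelLoopA res (cur ++ [c]) upper digit special rest

def pvSplitCamelA (s : List Char) : List (List Char) :=
  match s with
  | [] => []
  | c :: rest =>
    pvCamelLoopA [] [c] (PySem.Chars.isupper c) (PySem.Chars.isdigit c)
      (!PySem.Chars.isalnum c) rest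

def split_identifier_into_parts (identifier : String) : List String :=
  let snake := PySem.Chars.splitOn identifier.toList ['_']
  let parts := snake.foldl
    (fun acc part =>
      if part.length > 0 then acc ++ (pvSplitCamelA part).map PySem.Chars.lower else acc)
    ([] : List (List Char))
  if parts.length = 0 then [identifier] else parts.map (fun w => String.ofList w)

-- ===== PORT B =====
def pvCat (c : Char) : Nat :=
  if PySem.Chars.isupper c then 0
  else if PySem.Chars.isdigit c then 1
  else if !PySem.Chars.isalnum c then 2
  else 3

-- Source B's transition loop over adjacent tag pairs, producing word lengths
def pvLensLoop (lens : List Nat) (cur : Nat) : List (Nat × Nat) → List Nat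
  | [] => lens ++ [cur]
  | (p, q) :: rest =>
    if p = q then pvLensLoop lens (cur + 1) rest
    else if p = 0 ∧ q = 3 then
      if cur > 1 then pvLensLoop (lens ++ [cur - 1]) 2 rest
      else pvLensLoop lens (cur + 1) rest
    else pvLensLoop (lens ++ [cur]) 1 rest

-- Source B's slicing loop: words.append(rest[:n]); rest = rest[n:]
def pvTakeWords : List Nat → List Char → List (List Char)
  | [], _ => []
  | n :: ls, rest => rest.take n :: pvTakeWords ls (rest.drop n)

def pvCamelWordsB (s : List Char) : List (List Char) :=
  let tags := s.map pvCat
  pvTakeWords (pvLensLoop [] 1 (tags.zip tags.tail)) s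

def split_identifier_into_parts_alt (identifier : String) : List String :=
  let parts := (PySem.Chars.splitOn identifier.toList ['_']).foldl
    (fun acc part =>
      if part ≠ [] then acc ++ (pvCamelWordsB part).map PySem.Chars.lower else acc)
    ([] : List (List Char))
  if parts = [] then [identifier] else parts.map (fun w => String.ofList w)

-- ===== PRECONDITION & SPEC =====
def Spec_split_identifier_into_parts (identifier : String) (out : List String) : Prop := out = split_identifier_into_parts_alt identifier
instance (identifier : String) (out : List String) : Decidable (Spec_split_identifier_into_parts identifier out) := by unfold Spec_split_identifier_into_parts; infer_instance

-- ===== CLAIM (what is proved, stated in full; the proofs are below) =====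
def Claim_equal_split_identifier_into_parts : Prop := ∀ (identifier : String), Dom_split_identifier_into_parts identifier → Spec_split_identifier_into_parts identifier (split_identifier_into_parts identifier)

-- ===== LEMMAS AND PROOFS =====

-- word-splitting spec both camel splitters are reduced to: recursion on the remaining
-- chars, current word `cur` whose last char is `lc`, dispatch on category tags
def pvWSpec (cur : List Char) (lc : Char) : List Char → List (List Char)
  | [] => [cur]
  | c :: rest =>
    if pvCat lc = pvCat c then pvWSpec (cur ++ [c]) c rest
    else if pvCat lc = 0 ∧ pvCat c = 3 then
      if cur.length > 1 then cur.dropLast :: pvWSpec [lc, c] c rest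
      else pvWSpec (cur ++ [c]) c rest
    else cur :: pvWSpec [c] c rest

lemma pv_up_not_dig (c : Char) (h : PySem.Chars.isupper c = true) :
    PySem.Chars.isdigit c = false := by
  simp only [PySem.Chars.isupper, Bool.and_eq_true, decide_eq_true_eq] at h
  obtain ⟨h1, h2⟩ := h
  simp only [PySem.Chars.isdigit, Bool.and_eq_false_iff, decide_eq_false_iff_not, not_le]
  simp only [Char.le_def, UInt32.le_iff_toNat_le] at h1 h2
  simp only [Char.lt_def, UInt32.lt_iff_toNat_lt]
  right
  revert h1 h2
  show 65 ≤ c.val.toNat → c.val.toNat ≤ 90 → 57 < c.val.toNat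
  omega

lemma pvCat_up (c : Char) : PySem.Chars.isupper c = decide (pvCat c = 0) := by
  unfold pvCat; split_ifs <;> simp_all

lemma pvCat_dig (c : Char) : PySem.Chars.isdigit c = decide (pvCat c = 1) := by
  unfold pvCat; split_ifs <;> simp_all [pv_up_not_dig]

lemma pvCat_alnum (c : Char) : (!PySem.Chars.isalnum c) = decide (pvCat c = 2) := by
  unfold pvCat; split_ifs <;> simp_all [PySem.Chars.isalnum, PySem.Chars.isalpha]

lemma pvCat_cases (c : Char) : pvCat c = 0 ∨ pvCat c = 1 ∨ pvCat c = 2 ∨ pvCat c = 3 := by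
  unfold pvCat; split_ifs <;> simp

lemma pv_drop_pred (cur : List Char) (lc : Char) (h : cur.getLast? = some lc) :
    cur.drop (cur.length - 1) = [lc] := by
  induction cur with
  | nil => simp at h
  | cons a t ih =>
    cases t with
    | nil => simp_all
    | cons b t' =>
      simp only [List.getLast?_cons_cons] at h
      simpa using ih h

-- A's loop equals the spec (flags constrained to be the category tests of the last char)
lemma pvLoopA_eq (rest : List Char) : ∀ (res : List (List Char)) (cur : List Char)
    (lc : Char) (pU pD pS : Bool), cur.getLast? = some lc →
    pU = decide (pvCat lc = 0) → pD = decide (pvCat lc = 1) → pS = decide (pvCat lc = 2) →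
    pvCamelLoopA res cur pU pD pS rest = res ++ pvWSpec cur lc rest := by
  induction rest with
  | nil => intro res cur lc pU pD pS _ _ _ _; simp [pvCamelLoopA, pvWSpec]
  | cons c rest ih =>
    intro res cur lc pU pD pS h hU hD hS
    subst hU hD hS
    rw [pvCamelLoopA, pvWSpec]
    simp only [pvCat_up, pvCat_dig, pvCat_alnum]
    have hlast : cur.getLast?.getD ' ' = lc := by rw [h]; rfl
    rcases pvCat_cases lc with hp | hp | hp | hp <;>
      rcases pvCat_cases c with hq | hq | hq | hq <;>
      simp only [hp, hq, hlast] <;>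
      norm_num <;>
      first
      | (by_cases hlen : cur.length > 1 <;>
          simp only [hlen] <;>
          norm_num [hlen] <;>
          first
          | (rw [ih (res ++ [cur.dropLast]) [lc, c] c _ _ _ rfl (by simp [hq])
              (by simp [hq]) (by simp [hq])]; simp)
          | (rw [ih res (cur ++ [c]) c _ _ _ (by simp) (by simp [hq]) (by simp [hq])
              (by simp [hq])]))
      | (rw [ih res (cur ++ [c]) c _ _ _ (by simp) (by simp [hq]) (by simp [hq])
          (by simp [hq])])
      | (rw [ih (res ++ [cur]) [c] c _ _ _ rfl (by simp [hq]) (by simp [hq])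
          (by simp [hq])]; simp)

lemma pvLensLoop_acc (ps : List (Nat × Nat)) : ∀ (lens : List Nat) (k : Nat),
    pvLensLoop lens k ps = lens ++ pvLensLoop [] k ps := by
  induction ps with
  | nil => intro lens k; simp [pvLensLoop]
  | cons pq rest ih =>
    intro lens k
    obtain ⟨p, q⟩ := pq
    rw [pvLensLoop, pvLensLoop]
    split_ifs
    · exact ih lens (k + 1)
    · rw [ih (lens ++ [k - 1]) 2, ih ([] ++ [k - 1]) 2]; simp
    · exact ih lens (k + 1)
    · rw [ih (lens ++ [k]) 1, ih ([] ++ [k]) 1]; simp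

-- B's lens/slice pipeline equals the spec
lemma pvLens_eq (rest : List Char) : ∀ (cur : List Char) (lc : Char),
    cur.getLast? = some lc →
    pvTakeWords (pvLensLoop [] cur.length (((lc :: rest).map pvCat).zip (rest.map pvCat)))
      (cur ++ rest) = pvWSpec cur lc rest := by
  induction rest with
  | nil =>
    intro cur lc h
    rw [show ((lc :: ([] : List Char)).map pvCat).zip (([] : List Char).map pvCat) = []
      by simp]
    rw [pvLensLoop, pvWSpec, List.nil_append, List.append_nil, pvTakeWords, List.take_length]
    rfl
  | cons c rest ih =>
    intro cur lc h
    have hcur : cur ≠ [] := by rintro rfl; simp at h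
    have hk : 1 ≤ cur.length := by
      cases cur with | nil => simp at hcur | cons a t => simp
    simp only [List.map_cons, List.zip_cons_cons]
    rw [pvLensLoop, pvWSpec]
    by_cases hpq : pvCat lc = pvCat c
    · rw [if_pos hpq, if_pos hpq]
      have hlen1 : cur.length + 1 = (cur ++ [c]).length := by simp
      rw [hlen1]
      have := ih (cur ++ [c]) c (by simp)
      simpa using this
    · rw [if_neg hpq, if_neg hpq]
      by_cases h03 : pvCat lc = 0 ∧ pvCat c = 3
      · rw [if_pos h03, if_pos h03]
        by_cases hlen : cur.length > 1
        · rw [if_pos hlen, if_pos hlen]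
          simp only [List.nil_append]
          rw [pvLensLoop_acc _ [cur.length - 1] 2]
          simp only [List.singleton_append]
          rw [pvTakeWords]
          have h1 : (cur ++ c :: rest).take (cur.length - 1) = cur.dropLast := by
            rw [List.take_append_of_le_length (by omega), List.dropLast_eq_take]
          have h2 : (cur ++ c :: rest).drop (cur.length - 1) = lc :: c :: rest := by
            rw [List.drop_append_of_le_length (by omega), pv_drop_pred cur lc h]
            rfl
          rw [h1, h2]
          have h2' : (2 : Nat) = ([lc, c] : List Char).length := rfl
          rw [h2']
          have := ih [lc, c] c rfl
          simpa using this
        · rw [if_neg hlen, if_neg hlen]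
          have hlen1 : cur.length + 1 = (cur ++ [c]).length := by simp
          rw [hlen1]
          have := ih (cur ++ [c]) c (by simp)
          simpa using this
      · rw [if_neg h03, if_neg h03]
        simp only [List.nil_append]
        rw [pvLensLoop_acc _ [cur.length] 1]
        simp only [List.singleton_append]
        rw [pvTakeWords]
        have h1 : (cur ++ c :: rest).take cur.length = cur := by simp
        have h2 : (cur ++ c :: rest).drop cur.length = c :: rest := by simp
        rw [h1, h2]
        have h1' : (1 : Nat) = ([c] : List Char).length := rfl
        rw [h1']
        have := ih [c] c rfl
        simpa using this

lemma pvCamel_eq (s : List Char) (hs : s ≠ []) : pvSplitCamelA s = pvCamelWordsB s := by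
  cases s with
  | nil => exact absurd rfl hs
  | cons c rest =>
    unfold pvSplitCamelA pvCamelWordsB
    dsimp only
    rw [pvLoopA_eq rest [] [c] c _ _ _ rfl (by rw [pvCat_up]) (by rw [pvCat_dig])
      (by rw [pvCat_alnum])]
    simp only [List.map_cons, List.tail_cons]
    have h1 : (1 : Nat) = ([c] : List Char).length := rfl
    rw [List.nil_append, h1, ← pvLens_eq rest [c] c rfl]
    rfl

-- ===== VERDICT (by name: the statement is the Claim_ definition above) =====
theorem split_identifier_into_parts_spec : Claim_equal_split_identifier_into_parts := by
  intro identifier _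
  unfold Spec_split_identifier_into_parts split_identifier_into_parts split_identifier_into_parts_alt
  dsimp only
  have hfold : ∀ (acc : List (List Char)) (part : List Char),
      part ∈ PySem.Chars.splitOn identifier.toList ['_'] →
      (if part.length > 0 then acc ++ (pvSplitCamelA part).map PySem.Chars.lower else acc)
        = (if part ≠ [] then acc ++ (pvCamelWordsB part).map PySem.Chars.lower else acc) := by
    intro acc part _
    cases part with
    | nil => simp
    | cons c t => simp [pvCamel_eq (c :: t) (by simp)]
  have hF : (PySem.Chars.splitOn identifier.toList ['_']).foldl
      (fun acc part =>
        if part.length > 0 then acc ++ (pvSplitCamelA part).map PySem.Chars.lower else acc)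
      [] = (PySem.Chars.splitOn identifier.toList ['_']).foldl
      (fun acc part =>
        if part ≠ [] then acc ++ (pvCamelWordsB part).map PySem.Chars.lower else acc) [] :=
    PySem.List.foldl_congr_mem _ _ _ _ hfold
  rw [hF]
  simp [List.length_eq_zero_iff]
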